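-- pv_equiv track=rewrite | github.com/jun112465/studyRepo | algorithm/programmers/level2/프렌즈4블록.py | solution
-- ===== SOURCE A (Python) =====
-- def solution(m, n, board):
--     answer = 0
--     board = [list(row) for row in board]
--
--     nb = []
--     for j in range(n):
--         nb.append([])
--         for i in range(m):
--             nb[j].append(board[i][j])
--
--     while 1:
--         cnt = 0
--         check = [[0]*m for _ in range(n)]
--         for i in range(n-1):
--             for j in range(m-1):
--                 if nb[i][j] != "X" and nb[i][j] == nb[i+1][j] == nb[i][j+1] == nb[i+1][j+1]:
--                     cnt += 1
--                     check[i][j] = check[i+1][j] = check[i][j +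
--                                                            1] = check[i+1][j+1] = 1
--
--         if cnt == 0:
--             break
--
--         for i in range(n):
--             nb[i] = [nb[i][j] for j in range(m) if check[i][j] != 1]
--             answer += m - len(nb[i])
--             for j in range(m - len(nb[i])):
--                 nb[i].insert(0, "X")
--
--     return answer
-- ===== SOURCE B (Python) =====
-- def _hit(cols, m, n, r, c):
--     # does cell (row r, column c) belong to some matched 2x2 block? ("pull" test:
--     # inspect the up-to-four candidate blocks having this cell as a corner)
--     ch = cols[c][r]
--     if ch == 'X':
--         return False
--     for tr in (r - 1, r):
--         for tc in (c - 1, c):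
--             if 0 <= tr and tr + 1 < m and 0 <= tc and tc + 1 < n \
--                and cols[tc][tr] == cols[tc + 1][tr] == cols[tc][tr + 1] == cols[tc + 1][tr + 1] == ch:
--                 return True
--     return False
--
--
-- def solution(m, n, board):
--     # Board held as a list of columns; no mark matrix / mark set is ever built.
--     # Each round is one fused pass per column: every cell decides locally (via _hit)
--     # whether it dies, survivors are collected in order, the column is re-topped
--     # with 'X' and the removed cells are counted on the fly.
--     cols = [[board[r][c] for r in range(m)] for c in range(n)]
--     answer = 0
--     while True:
--         new_cols = []
--         hits = 0
--         for c in range(n):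
--             keep = []
--             gone = 0
--             for r in range(m):
--                 if _hit(cols, m, n, r, c):
--                     gone += 1
--                 else:
--                     keep.append(cols[c][r])
--             hits += gone
--             new_cols.append(['X'] * gone + keep)
--         if hits == 0:
--             return answer
--         answer += hits
--         cols = new_cols
-- ===== Notes on version B (the rewrite author's own statement) =====
-- stated objective: alternative
-- what changed: B never builds A's mark structure: instead of A's block-scan pass that pushes 1s into a check matrix on a transposed board followed by a separate filter-then-insert(0,'X') gravity pass, every cell decides locally (pull test of its up-to-four candidate 2x2 blocks) whether it dies, and removal, gravity and counting are fused into a single rebuild pass per column producing a fresh board each round.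
import Mathlib
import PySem

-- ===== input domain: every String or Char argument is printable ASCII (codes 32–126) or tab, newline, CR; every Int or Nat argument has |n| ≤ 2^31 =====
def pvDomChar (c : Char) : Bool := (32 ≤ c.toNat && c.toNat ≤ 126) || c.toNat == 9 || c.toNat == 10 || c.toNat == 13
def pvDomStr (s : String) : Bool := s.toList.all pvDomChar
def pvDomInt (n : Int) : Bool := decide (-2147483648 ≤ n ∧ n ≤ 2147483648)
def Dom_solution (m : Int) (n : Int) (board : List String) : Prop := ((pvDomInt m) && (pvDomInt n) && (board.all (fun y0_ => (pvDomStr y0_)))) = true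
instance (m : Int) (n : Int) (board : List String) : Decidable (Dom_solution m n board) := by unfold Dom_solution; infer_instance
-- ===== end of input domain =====

-- B replaces A's push-marking (block scan filling a check matrix, then a separate
-- filter/insert-front gravity pass) by a local per-cell pull test of the four candidate
-- 2x2 blocks, fused with gravity and counting into one rebuild pass per column.

-- ===== PORT A =====
-- grid cell access g[i][j]; every access is in range on inputs admitted by Pre_solution
-- (Python raises out of range; the default 'X' is never reached there)
def pvCell (g : List (List Char)) (i j : Nat) : Char := (g.getD i []).getD j 'X'
def pvGet2 (g : List (List Int)) (i j : Nat) : Int := (g.getD i []).getD j 0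
def pvSet2 (g : List (List Int)) (i j : Nat) : List (List Int) := g.modify i (fun row => row.set j 1)

-- nb[i][j] != "X" and nb[i][j] == nb[i+1][j] == nb[i][j+1] == nb[i+1][j+1]
def pvMatchA (nb : List (List Char)) (i j : Nat) : Bool :=
  (pvCell nb i j != 'X') && (pvCell nb i j == pvCell nb (i+1) j)
    && (pvCell nb (i+1) j == pvCell nb i (j+1)) && (pvCell nb i (j+1) == pvCell nb (i+1) (j+1))

-- the cnt/check double loop (Python range(n-1) iterates (n-1).toNat = n.toNat - 1 times)
def pvMarkA (M N : Nat) (nb : List (List Char)) : Int × List (List Int) :=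
  (List.range (N - 1)).foldl (fun st i =>
    (List.range (M - 1)).foldl (fun st' j =>
      if pvMatchA nb i j then
        (st'.1 + 1, pvSet2 (pvSet2 (pvSet2 (pvSet2 st'.2 i j) (i+1) j) i (j+1)) (i+1) (j+1))
      else st') st)
    (0, List.replicate N (List.replicate M 0))

-- body of 'for i in range(n)': filter the column, count, then insert "X" at the front
def pvDropA (M : Nat) (check : List (List Int)) (st : List (List Char) × Int) (i : Nat) :
    List (List Char) × Int :=
  let col := ((List.range M).filter (fun j => pvGet2 check i j != 1)).map (fun j => pvCell st.1 i j)
  let ans := st.2 + ((M : Int) - (col.length : Int))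
  let col2 := (List.range (M - col.length)).foldl (fun c _ => 'X' :: c) col
  (st.1.set i col2, ans)

-- 'while 1' loop; fuel is only a totality guard (each productive round removes a cell)
def pvLoopA (M N : Nat) : Nat → List (List Char) → Int → Int
  | 0, _, ans => ans
  | fuel+1, nb, ans =>
    let r := pvMarkA M N nb
    if r.1 == 0 then ans
    else
      let st := (List.range N).foldl (pvDropA M r.2) (nb, ans)
      pvLoopA M N fuel st.1 st.2

def solution (m : Int) (n : Int) (board : List String) : Int :=
  let b := board.map String.toList
  let nb := (List.range n.toNat).map (fun j => (List.range m.toNat).map (fun i => pvCell b i j))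
  pvLoopA m.toNat n.toNat (m.toNat * n.toNat + 1) nb 0

-- ===== PORT B =====
-- the chained comparison cols[tc][tr] == cols[tc+1][tr] == cols[tc][tr+1] == cols[tc+1][tr+1] == ch
def pvBlockEq (cols : List (List Char)) (tr tc : Nat) (ch : Char) : Bool :=
  (pvCell cols tc tr == pvCell cols (tc+1) tr) && (pvCell cols (tc+1) tr == pvCell cols tc (tr+1))
    && (pvCell cols tc (tr+1) == pvCell cols (tc+1) (tr+1)) && (pvCell cols (tc+1) (tr+1) == ch)

-- _hit: the two-element Python loops 'for tr in (r-1, r): for tc in (c-1, c)' unrolled in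
-- order; each guard '0 <= tr and tr+1 < m and 0 <= tc and tc+1 < n' becomes the decide's
def pvHit (M N : Nat) (cols : List (List Char)) (r c : Nat) : Bool :=
  let ch := pvCell cols c r
  if ch == 'X' then false
  else
    (decide (1 ≤ r) && decide (r < M) && decide (1 ≤ c) && decide (c < N) && pvBlockEq cols (r-1) (c-1) ch)
    || (decide (1 ≤ r) && decide (r < M) && decide (c+1 < N) && pvBlockEq cols (r-1) c ch)
    || (decide (r+1 < M) && decide (1 ≤ c) && decide (c < N) && pvBlockEq cols r (c-1) ch)
    || (decide (r+1 < M) && decide (c+1 < N) && pvBlockEq cols r c ch)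

-- the inner 'for r in range(m)' pass of one column: count the dead, collect the survivors
def pvColB (M N : Nat) (cols : List (List Char)) (c : Nat) : Nat × List Char :=
  (List.range M).foldl (fun st r =>
    if pvHit M N cols r c then (st.1 + 1, st.2) else (st.1, st.2 ++ [pvCell cols c r]))
    (0, [])

-- the 'for c in range(n)' pass of one round: fresh columns and the round's hit count
def pvRoundB (M N : Nat) (cols : List (List Char)) : List (List Char) × Int :=
  (List.range N).foldl (fun st c =>
    let p := pvColB M N cols c
    (st.1 ++ [List.replicate p.1 'X' ++ p.2], st.2 + (p.1 : Int))) ([], 0)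

def pvLoopB (M N : Nat) : Nat → List (List Char) → Int → Int
  | 0, _, ans => ans
  | fuel+1, cols, ans =>
    let r := pvRoundB M N cols
    if r.2 == 0 then ans else pvLoopB M N fuel r.1 (ans + r.2)

def solution_alt (m : Int) (n : Int) (board : List String) : Int :=
  let b := board.map String.toList
  let cols := (List.range n.toNat).map (fun c => (List.range m.toNat).map (fun r => pvCell b r c))
  pvLoopB m.toNat n.toNat (m.toNat * n.toNat + 1) cols 0

-- ===== PRECONDITION & SPEC =====
-- Pre_solution is exactly A's non-raising domain: when m ≥ 1 and n ≥ 1 the transpose loop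
-- indexes board[i][j] for all i < m, j < n (IndexError otherwise); for m ≤ 0 or n ≤ 0 no
-- cell is ever touched and A returns 0.
def Pre_solution (m : Int) (n : Int) (board : List String) : Prop :=
  1 ≤ m → 1 ≤ n → (m ≤ (board.length : Int) ∧ ∀ s ∈ board.take m.toNat, n ≤ (PySem.Str.len s))
instance (m : Int) (n : Int) (board : List String) : Decidable (Pre_solution m n board) := by
  unfold Pre_solution; infer_instance

def pvWitness_solution : Int × Int × List String := (2, 2, ["AA", "AA"])

def Spec_solution (m : Int) (n : Int) (board : List String) (out : Int) : Prop :=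
  out = solution_alt m n board
instance (m : Int) (n : Int) (board : List String) (out : Int) : Decidable (Spec_solution m n board out) := by
  unfold Spec_solution; infer_instance

-- ===== CLAIM (what is proved, stated in full; the proofs are below) =====
def Claim_equal_solution : Prop := ∀ (m : Int) (n : Int) (board : List String),
  Dom_solution m n board → Pre_solution m n board → Spec_solution m n board (solution m n board)

-- ===== LEMMAS AND PROOFS =====

-- all (i,j) with i < I, j < J, in the traversal order of a nested loop
def pvPairs (I J : Nat) : List (Nat × Nat) :=
  (List.range I).flatMap (fun i => (List.range J).map (fun j => (i, j)))

-- is (x,y) one of the four corners of the 2x2 block at p?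
def pvCorner (p : Nat × Nat) (x y : Nat) : Bool :=
  (x == p.1 || x == p.1 + 1) && (y == p.2 || y == p.2 + 1)

def pvDims (ch : List (List Int)) (N M : Nat) : Prop :=
  ch.length = N ∧ ∀ x, x < N → (ch.getD x []).length = M

-- the survivors / dead count of one column, as B computes them
def pvKeepL (M N : Nat) (cols : List (List Char)) (c : Nat) : List Char :=
  ((List.range M).filter (fun r => !pvHit M N cols r c)).map (fun r => pvCell cols c r)
def pvGoneL (M N : Nat) (cols : List (List Char)) (c : Nat) : Nat :=
  ((List.range M).filter (fun r => pvHit M N cols r c)).length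

lemma mem_pvPairs (I J : Nat) (p : Nat × Nat) : p ∈ pvPairs I J ↔ p.1 < I ∧ p.2 < J := by
  cases p
  simp [pvPairs, List.mem_flatMap, List.mem_map, List.mem_range]

lemma foldl_nested_pairs {σ : Type} (f : σ → Nat → Nat → σ) (l1 l2 : List Nat) (st : σ) :
    l1.foldl (fun st i => l2.foldl (fun st' j => f st' i j) st) st
      = (l1.flatMap (fun i => l2.map (fun j => (i, j)))).foldl (fun st p => f st p.1 p.2) st := by
  induction l1 generalizing st with
  | nil => rfl
  | cons a t ih => simp [List.foldl_append, List.foldl_map, ih]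

lemma pvGet2_replicate (N M x y : Nat) :
    pvGet2 (List.replicate N (List.replicate M 0)) x y = 0 := by
  simp [pvGet2, List.getD_eq_getElem?_getD, List.getElem?_replicate]
  split_ifs <;> simp

lemma pvDims_replicate (N M : Nat) : pvDims (List.replicate N (List.replicate M 0)) N M := by
  constructor
  · simp
  · intro x hx; simp [List.getD_eq_getElem?_getD, hx]

lemma pvDims_set2 {ch : List (List Int)} {N M : Nat} (h : pvDims ch N M) (i j : Nat) :
    pvDims (pvSet2 ch i j) N M := by
  obtain ⟨h1, h2⟩ := h
  constructor
  · simp [pvSet2, h1]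
  · intro x hx
    simp only [pvSet2, List.getD_eq_getElem?_getD, List.getElem?_modify]
    have hx2 := h2 x hx
    simp only [List.getD_eq_getElem?_getD] at hx2
    cases hgx : ch[x]? with
    | none => simp only [hgx] at hx2 ⊢; simpa using hx2
    | some row =>
      by_cases hix : i = x <;> simp only [hgx] at hx2 ⊢ <;> simp [hix] <;> simpa using hx2

lemma pvGet2_set2 {ch : List (List Int)} {N M : Nat} (h : pvDims ch N M)
    {i j : Nat} (hi : i < N) (hj : j < M) (x y : Nat) :
    pvGet2 (pvSet2 ch i j) x y = if x = i ∧ y = j then 1 else pvGet2 ch x y := by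
  obtain ⟨h1, h2⟩ := h
  have hi' : i < ch.length := by omega
  have hrg : ch[i]? = some ch[i] := List.getElem?_eq_getElem hi'
  have hrl : (ch[i]).length = M := by
    have := h2 i hi
    simpa [List.getD_eq_getElem?_getD, hrg] using this
  simp only [pvGet2, pvSet2, List.getD_eq_getElem?_getD, List.getElem?_modify]
  by_cases hxi : x = i
  · subst hxi
    simp only [hrg, Option.getD_some]
    by_cases hyj : y = j
    · subst hyj
      simp [hrl, hj]
    · simp [Ne.symm hyj, hyj]
  · rw [if_neg (fun hh : x = i ∧ y = j => hxi hh.1)]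
    simp [Ne.symm hxi]

-- A's mark loop over an arbitrary pair list
lemma markA_fold_spec (nb : List (List Char)) (N M : Nat) :
    ∀ (L : List (Nat × Nat)), (∀ p ∈ L, p.1 + 1 < N ∧ p.2 + 1 < M) →
    ∀ st : Int × List (List Int), pvDims st.2 N M →
    pvDims (L.foldl (fun st' p =>
        if pvMatchA nb p.1 p.2 then
          (st'.1 + 1, pvSet2 (pvSet2 (pvSet2 (pvSet2 st'.2 p.1 p.2) (p.1+1) p.2) p.1 (p.2+1)) (p.1+1) (p.2+1))
        else st') st).2 N M
    ∧ (L.foldl (fun st' p =>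
        if pvMatchA nb p.1 p.2 then
          (st'.1 + 1, pvSet2 (pvSet2 (pvSet2 (pvSet2 st'.2 p.1 p.2) (p.1+1) p.2) p.1 (p.2+1)) (p.1+1) (p.2+1))
        else st') st).1 = st.1 + ((L.filter (fun p => pvMatchA nb p.1 p.2)).length : Int)
    ∧ ∀ x y, pvGet2 (L.foldl (fun st' p =>
        if pvMatchA nb p.1 p.2 then
          (st'.1 + 1, pvSet2 (pvSet2 (pvSet2 (pvSet2 st'.2 p.1 p.2) (p.1+1) p.2) p.1 (p.2+1)) (p.1+1) (p.2+1))
        else st') st).2 x y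
      = if (L.any fun p => pvMatchA nb p.1 p.2 && pvCorner p x y) = true then 1
        else pvGet2 st.2 x y := by
  intro L
  induction L with
  | nil => intro _ st hd; simp [hd]
  | cons p0 t ih =>
    intro hL st hd
    have hp0 := hL p0 (by simp)
    set st1 : Int × List (List Int) :=
      (if pvMatchA nb p0.1 p0.2 then
        (st.1 + 1, pvSet2 (pvSet2 (pvSet2 (pvSet2 st.2 p0.1 p0.2) (p0.1+1) p0.2) p0.1 (p0.2+1)) (p0.1+1) (p0.2+1))
      else st) with hst1
    have hd1 : pvDims st1.2 N M := by
      rw [hst1]; split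
      · exact pvDims_set2 (pvDims_set2 (pvDims_set2 (pvDims_set2 hd _ _) _ _) _ _) _ _
      · exact hd
    have hfst1 : st1.1 = st.1 + (if pvMatchA nb p0.1 p0.2 then 1 else 0) := by
      rw [hst1]; split <;> simp
    have hget1 : ∀ x y, pvGet2 st1.2 x y
        = if (pvMatchA nb p0.1 p0.2 && pvCorner p0 x y) = true then 1 else pvGet2 st.2 x y := by
      intro x y
      rw [hst1]
      by_cases hmt : pvMatchA nb p0.1 p0.2
      · have d1 : pvDims (pvSet2 st.2 p0.1 p0.2) N M := pvDims_set2 hd _ _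
        have d2 : pvDims (pvSet2 (pvSet2 st.2 p0.1 p0.2) (p0.1+1) p0.2) N M := pvDims_set2 d1 _ _
        have d3 : pvDims (pvSet2 (pvSet2 (pvSet2 st.2 p0.1 p0.2) (p0.1+1) p0.2) p0.1 (p0.2+1)) N M :=
          pvDims_set2 d2 _ _
        rw [if_pos hmt]
        show pvGet2 (pvSet2 (pvSet2 (pvSet2 (pvSet2 st.2 p0.1 p0.2) (p0.1+1) p0.2) p0.1 (p0.2+1)) (p0.1+1) (p0.2+1)) x y = _
        rw [pvGet2_set2 d3 (by omega) (by omega),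
            pvGet2_set2 d2 (by omega) (by omega),
            pvGet2_set2 d1 (by omega) (by omega),
            pvGet2_set2 hd (by omega) (by omega)]
        simp only [hmt, pvCorner, Bool.true_and, Bool.and_eq_true, Bool.or_eq_true, beq_iff_eq]
        split_ifs <;> first | rfl | tauto
      · rw [if_neg hmt]
        simp [hmt]
    have hL' : ∀ p ∈ t, p.1 + 1 < N ∧ p.2 + 1 < M := fun p hp => hL p (by simp [hp])
    obtain ⟨ihd, ihf, ihg⟩ := ih hL' st1 hd1
    refine ⟨?_, ?_, ?_⟩
    · rw [List.foldl_cons, ← hst1]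
      exact ihd
    · rw [List.foldl_cons, ← hst1, ihf, hfst1, List.filter_cons]
      by_cases hmt : pvMatchA nb p0.1 p0.2 <;> simp [hmt] <;> ring
    · intro x y
      rw [List.foldl_cons, ← hst1, ihg x y, hget1 x y, List.any_cons]
      by_cases h1 : (t.any fun p => pvMatchA nb p.1 p.2 && pvCorner p x y) = true
      · simp [h1]
      · simp [h1]

-- pvMarkA as a fold over the pair list
lemma pvMarkA_eq (M N : Nat) (nb : List (List Char)) :
    pvMarkA M N nb = (pvPairs (N-1) (M-1)).foldl (fun st' p =>
        if pvMatchA nb p.1 p.2 then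
          (st'.1 + 1, pvSet2 (pvSet2 (pvSet2 (pvSet2 st'.2 p.1 p.2) (p.1+1) p.2) p.1 (p.2+1)) (p.1+1) (p.2+1))
        else st') (0, List.replicate N (List.replicate M 0)) := by
  unfold pvMarkA pvPairs
  exact foldl_nested_pairs
    (fun st' i j => if pvMatchA nb i j then
        (st'.1 + 1, pvSet2 (pvSet2 (pvSet2 (pvSet2 st'.2 i j) (i+1) j) i (j+1)) (i+1) (j+1))
      else st')
    (List.range (N-1)) (List.range (M-1)) _

lemma pvMarkA_spec (M N : Nat) (nb : List (List Char)) :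
    ((pvMarkA M N nb).1 = 0 ↔ ∀ p ∈ pvPairs (N-1) (M-1), ¬ pvMatchA nb p.1 p.2 = true)
    ∧ ∀ x y, pvGet2 (pvMarkA M N nb).2 x y
        = if ((pvPairs (N-1) (M-1)).any fun p => pvMatchA nb p.1 p.2 && pvCorner p x y) = true then 1
          else 0 := by
  have hL : ∀ p ∈ pvPairs (N-1) (M-1), p.1 + 1 < N ∧ p.2 + 1 < M := by
    intro p hp
    have h := (mem_pvPairs _ _ p).1 hp
    omega
  obtain ⟨hd, hf, hg⟩ := markA_fold_spec nb N M (pvPairs (N-1) (M-1)) hL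
    (0, List.replicate N (List.replicate M 0)) (pvDims_replicate N M)
  rw [pvMarkA_eq]
  refine ⟨?_, ?_⟩
  · rw [hf]
    simp [Int.natCast_eq_zero, List.filter_eq_nil_iff]
  · intro x y
    rw [hg x y, pvGet2_replicate]

-- a matched block's cells all carry its (non-'X') value
lemma match_corner_val (cols : List (List Char)) (i j x y : Nat)
    (hm : pvMatchA cols i j = true) (hc : pvCorner (i, j) x y = true) :
    pvCell cols x y = pvCell cols i j ∧ pvCell cols i j ≠ 'X' := by
  simp only [pvMatchA, Bool.and_eq_true, beq_iff_eq, bne_iff_ne] at hm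
  obtain ⟨⟨⟨hne, e1⟩, e2⟩, e3⟩ := hm
  simp only [pvCorner, Bool.and_eq_true, Bool.or_eq_true, beq_iff_eq] at hc
  obtain ⟨hx | hx, hy | hy⟩ := hc <;> subst hx <;> subst hy
  · exact ⟨rfl, hne⟩
  · exact ⟨(e1.trans e2).symm, hne⟩
  · exact ⟨e1.symm, hne⟩
  · exact ⟨(e1.trans (e2.trans e3)).symm, hne⟩

-- a matched block passes B's chained test against any of its corner values
lemma match_blockEq (cols : List (List Char)) (i j x y : Nat)
    (hm : pvMatchA cols i j = true) (hc : pvCorner (i, j) x y = true) :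
    pvBlockEq cols j i (pvCell cols x y) = true := by
  obtain ⟨hval, -⟩ := match_corner_val cols i j x y hm hc
  simp only [pvMatchA, Bool.and_eq_true, beq_iff_eq, bne_iff_ne] at hm
  obtain ⟨⟨⟨hne, e1⟩, e2⟩, e3⟩ := hm
  simp only [pvBlockEq, Bool.and_eq_true, beq_iff_eq]
  exact ⟨⟨⟨e1, e2⟩, e3⟩, by rw [hval, e1, e2, e3]⟩

-- B's chained test with a non-'X' reference value certifies the A-side block match
lemma blockEq_match (cols : List (List Char)) (i j : Nat) (ch : Char)
    (hne : ch ≠ 'X') (hb : pvBlockEq cols j i ch = true) : pvMatchA cols i j = true := by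
  simp only [pvBlockEq, Bool.and_eq_true, beq_iff_eq] at hb
  obtain ⟨⟨⟨e1, e2⟩, e3⟩, e4⟩ := hb
  simp only [pvMatchA, Bool.and_eq_true, beq_iff_eq, bne_iff_ne]
  exact ⟨⟨⟨by rw [e1, e2, e3, e4]; exact hne, e1⟩, e2⟩, e3⟩

-- THE pivot: B's local pull test = "some matched block has this cell as a corner"
lemma pvHit_any (M N : Nat) (cols : List (List Char)) (r c : Nat) :
    pvHit M N cols r c
      = ((pvPairs (N-1) (M-1)).any fun p => pvMatchA cols p.1 p.2 && pvCorner p c r) := by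
  rw [Bool.eq_iff_iff, List.any_eq_true]
  by_cases hx : (pvCell cols c r == 'X') = true
  · rw [beq_iff_eq] at hx
    constructor
    · intro h
      simp [pvHit, hx] at h
    · rintro ⟨p, hp, hb⟩
      rw [Bool.and_eq_true] at hb
      obtain ⟨hval, hne⟩ := match_corner_val cols p.1 p.2 c r hb.1 hb.2
      exact absurd (hval.symm.trans hx) hne
  · have hne : pvCell cols c r ≠ 'X' := by simpa using hx
    simp only [pvHit, if_neg hx, Bool.or_eq_true, Bool.and_eq_true, decide_eq_true_iff]
    constructor
    · rintro (((⟨⟨⟨⟨h1, h2⟩, h3⟩, h4⟩, hb⟩ | ⟨⟨⟨h1, h2⟩, h3⟩, hb⟩) | ⟨⟨⟨h1, h2⟩, h3⟩, hb⟩) | ⟨⟨h1, h2⟩, hb⟩)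
      · refine ⟨(c-1, r-1), (mem_pvPairs _ _ _).2 ⟨by omega, by omega⟩, ?_⟩
        exact ⟨blockEq_match cols (c-1) (r-1) _ hne hb,
          by
            simp only [pvCorner, Bool.and_eq_true, Bool.or_eq_true, beq_iff_eq,
              eq_self_iff_true, true_or, and_true, true_and] <;>
            omega⟩
      · refine ⟨(c, r-1), (mem_pvPairs _ _ _).2 ⟨by omega, by omega⟩, ?_⟩
        exact ⟨blockEq_match cols c (r-1) _ hne hb,
          by
            simp only [pvCorner, Bool.and_eq_true, Bool.or_eq_true, beq_iff_eq,
              eq_self_iff_true, true_or, and_true, true_and] <;>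
            omega⟩
      · refine ⟨(c-1, r), (mem_pvPairs _ _ _).2 ⟨by omega, by omega⟩, ?_⟩
        exact ⟨blockEq_match cols (c-1) r _ hne hb,
          by
            simp only [pvCorner, Bool.and_eq_true, Bool.or_eq_true, beq_iff_eq,
              eq_self_iff_true, true_or, and_true, true_and] <;>
            omega⟩
      · refine ⟨(c, r), (mem_pvPairs _ _ _).2 ⟨by omega, by omega⟩, ?_⟩
        exact ⟨blockEq_match cols c r _ hne hb,
          by
            simp only [pvCorner, Bool.and_eq_true, Bool.or_eq_true, beq_iff_eq,
              eq_self_iff_true, true_or, and_true, true_and] <;>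
            omega⟩
    · rintro ⟨p, hp, hb⟩
      obtain ⟨hpN, hpM⟩ := (mem_pvPairs _ _ p).1 hp
      obtain ⟨hm, hcor⟩ := hb
      have hbe := match_blockEq cols p.1 p.2 c r hm hcor
      simp only [pvCorner, Bool.and_eq_true, Bool.or_eq_true, beq_iff_eq] at hcor
      obtain ⟨hc1 | hc1, hr1 | hr1⟩ := hcor
      · refine Or.inr ⟨⟨by omega, by omega⟩, ?_⟩
        rw [← hc1, ← hr1] at hbe; exact hbe
      · refine Or.inl (Or.inl (Or.inr ⟨⟨⟨by omega, by omega⟩, by omega⟩, ?_⟩))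
        have e1 : r - 1 = p.2 := by omega
        rw [← hc1, ← e1] at hbe; exact hbe
      · refine Or.inl (Or.inr ⟨⟨⟨by omega, by omega⟩, by omega⟩, ?_⟩)
        have e1 : c - 1 = p.1 := by omega
        rw [← hr1, ← e1] at hbe; exact hbe
      · refine Or.inl (Or.inl (Or.inl ⟨⟨⟨⟨by omega, by omega⟩, by omega⟩, by omega⟩, ?_⟩))
        have e1 : r - 1 = p.2 := by omega
        have e2 : c - 1 = p.1 := by omega
        rw [← e1, ← e2] at hbe; exact hbe

-- the two sides use the same keep/kill predicate
lemma pred_eq (M N : Nat) (nb : List (List Char)) (i j : Nat) :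
    ((pvGet2 (pvMarkA M N nb).2 i j != 1) : Bool) = !pvHit M N nb j i := by
  rw [(pvMarkA_spec M N nb).2 i j, pvHit_any]
  by_cases h : ((pvPairs (N-1) (M-1)).any fun p => pvMatchA nb p.1 p.2 && pvCorner p i j) = true
  · rw [if_pos h, h]; decide
  · rw [if_neg h, Bool.eq_false_iff.2 (fun hh => h hh)]; decide

lemma filter_partition {α : Type} (p : α → Bool) (l : List α) :
    (l.filter p).length + (l.filter (fun x => !p x)).length = l.length := by
  induction l with
  | nil => rfl
  | cons a t ih => by_cases h : p a <;> simp [List.filter_cons, h, ← ih] <;> omega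

lemma gone_keep (M N : Nat) (cols : List (List Char)) (c : Nat) :
    pvGoneL M N cols c + (pvKeepL M N cols c).length = M := by
  have := filter_partition (fun r => pvHit M N cols r c) (List.range M)
  simp only [pvGoneL, pvKeepL, List.length_map, List.length_range] at *
  omega

-- closed form of B's column pass
lemma colB_fold (M N : Nat) (cols : List (List Char)) (c : Nat) :
    ∀ (l : List Nat) (g : Nat) (acc : List Char),
    l.foldl (fun st r =>
        if pvHit M N cols r c then (st.1 + 1, st.2) else (st.1, st.2 ++ [pvCell cols c r])) (g, acc)
      = (g + (l.filter (fun r => pvHit M N cols r c)).length,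
         acc ++ (l.filter (fun r => !pvHit M N cols r c)).map (fun r => pvCell cols c r)) := by
  intro l
  induction l with
  | nil => intro g acc; simp
  | cons a t ih =>
    intro g acc
    by_cases h : pvHit M N cols a c <;>
      simp [List.filter_cons, h, ih] <;> omega

lemma pvColB_closed (M N : Nat) (cols : List (List Char)) (c : Nat) :
    pvColB M N cols c = (pvGoneL M N cols c, pvKeepL M N cols c) := by
  unfold pvColB pvGoneL pvKeepL
  rw [colB_fold]
  simp

-- closed form of B's round pass
lemma roundB_fold (g : Nat → List Char) (h : Nat → Int) :
    ∀ (l : List Nat) (acc : List (List Char)) (a : Int),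
    l.foldl (fun st c => (st.1 ++ [g c], st.2 + h c)) (acc, a)
      = (acc ++ l.map g, a + (l.map h).sum) := by
  intro l
  induction l with
  | nil => intro acc a; simp
  | cons x t ih =>
    intro acc a
    rw [List.foldl_cons, ih]
    simp [List.map_cons]
    ring

lemma pvRoundB_closed (M N : Nat) (cols : List (List Char)) :
    pvRoundB M N cols
      = ((List.range N).map (fun c => List.replicate (pvGoneL M N cols c) 'X' ++ pvKeepL M N cols c),
         ((List.range N).map (fun c => ((pvGoneL M N cols c : Nat) : Int))).sum) := by
  unfold pvRoundB
  rw [show (fun (st : List (List Char) × Int) c =>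
      let p := pvColB M N cols c
      (st.1 ++ [List.replicate p.1 'X' ++ p.2], st.2 + (p.1 : Int)))
    = (fun st c => (st.1 ++ [List.replicate (pvColB M N cols c).1 'X' ++ (pvColB M N cols c).2],
        st.2 + ((pvColB M N cols c).1 : Int))) from rfl]
  rw [roundB_fold (fun c => List.replicate (pvColB M N cols c).1 'X' ++ (pvColB M N cols c).2)
      (fun c => ((pvColB M N cols c).1 : Int))]
  simp [pvColB_closed]

-- hits == 0 on B's side iff cnt == 0 on A's side
lemma cnt_hits_zero (M N : Nat) (nb : List (List Char)) :
    (((pvMarkA M N nb).1 == 0) : Bool) = ((pvRoundB M N nb).2 == 0) := by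
  rw [Bool.eq_iff_iff, beq_iff_eq, beq_iff_eq, (pvMarkA_spec M N nb).1, pvRoundB_closed]
  have hsum : (((List.range N).map (fun c => ((pvGoneL M N nb c : Nat) : Int))).sum = 0)
      ↔ ∀ c < N, pvGoneL M N nb c = 0 := by
    rw [show ((List.range N).map (fun c => ((pvGoneL M N nb c : Nat) : Int)))
        = ((List.range N).map (fun c => pvGoneL M N nb c)).map (fun k => ((k : Nat) : Int)) from by
      rw [List.map_map]; rfl]
    rw [show (((List.range N).map (fun c => pvGoneL M N nb c)).map (fun k => ((k : Nat) : Int))).sum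
        = ((((List.range N).map (fun c => pvGoneL M N nb c)).sum : Nat) : Int) from by
      induction (List.range N) with
      | nil => simp
      | cons a t ih => simp [ih, Nat.cast_add]]
    rw [Int.natCast_eq_zero, List.sum_eq_zero_iff]
    simp [List.mem_map, List.mem_range]
  rw [hsum]
  constructor
  · intro h c hc
    rw [pvGoneL, List.length_eq_zero_iff, List.filter_eq_nil_iff]
    intro r hr hhit
    rw [pvHit_any, List.any_eq_true] at hhit
    obtain ⟨p, hp, hb⟩ := hhit
    rw [Bool.and_eq_true] at hb
    exact h p hp hb.1
  · intro h p hp hm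
    obtain ⟨hpN, hpM⟩ := (mem_pvPairs _ _ p).1 hp
    have := h p.1 (by omega)
    rw [pvGoneL, List.length_eq_zero_iff, List.filter_eq_nil_iff] at this
    apply this p.2 (List.mem_range.mpr (by omega))
    rw [pvHit_any, List.any_eq_true]
    exact ⟨p, hp, by simp [hm, pvCorner]⟩

-- A's gravity fold, in closed form, over a suffix of the column range
lemma foldA_aux (M N : Nat) (nb : List (List Char)) (hlen : nb.length = N) :
    ∀ (d k : Nat), k + d = N → ∀ (acc : List (List Char)) (a : Int), acc.length = k →
    (List.range' k d).foldl (pvDropA M (pvMarkA M N nb).2) (acc ++ nb.drop k, a)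
      = (acc ++ (List.range' k d).map
            (fun c => List.replicate (M - (pvKeepL M N nb c).length) 'X' ++ pvKeepL M N nb c),
         a + ((List.range' k d).map
            (fun c => (M : Int) - ((pvKeepL M N nb c).length : Int))).sum) := by
  intro d
  induction d with
  | zero =>
    intro k hk acc a hacc
    have : nb.drop k = [] := by rw [List.drop_eq_nil_iff]; omega
    simp [this]
  | succ d ih =>
    intro k hk acc a hacc
    have hkN : k < N := by omega
    have hkl : k < nb.length := by omega
    rw [List.range'_succ, List.foldl_cons]
    have hdropk : nb.drop k = nb[k] :: nb.drop (k+1) := List.drop_eq_getElem_cons hkl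
    -- the cell reads of the step hit untouched columns: column k of acc ++ nb.drop k is nb[k]
    have hcellk : ∀ j, pvCell (acc ++ nb.drop k) k j = pvCell nb k j := by
      intro j
      simp only [pvCell, List.getD_eq_getElem?_getD]
      rw [List.getElem?_append_right (by omega), hacc, Nat.sub_self, hdropk]
      simp [List.getElem?_eq_getElem hkl]
    have hpredk : (fun j => ((pvGet2 (pvMarkA M N nb).2 k j != 1) : Bool))
        = (fun j => !pvHit M N nb j k) := by
      funext j; exact pred_eq M N nb k j
    have hcol : ((List.range M).filter (fun j => pvGet2 (pvMarkA M N nb).2 k j != 1)).map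
          (fun j => pvCell (acc ++ nb.drop k) k j) = pvKeepL M N nb k := by
      rw [hpredk, pvKeepL]
      exact List.map_congr_left (fun j _ => hcellk j)
    have hstep : pvDropA M (pvMarkA M N nb).2 (acc ++ nb.drop k, a) k
        = ((acc ++ [List.replicate (M - (pvKeepL M N nb k).length) 'X' ++ pvKeepL M N nb k])
             ++ nb.drop (k+1),
           a + ((M : Int) - ((pvKeepL M N nb k).length : Int))) := by
      show ((acc ++ nb.drop k).set k _, _) = _
      rw [hcol]
      refine Prod.ext ?_ rfl
      show (acc ++ nb.drop k).set k
          ((List.range (M - (pvKeepL M N nb k).length)).foldl (fun c _ => 'X' :: c) (pvKeepL M N nb k)) = _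
      have hrepl : (List.range (M - (pvKeepL M N nb k).length)).foldl (fun c _ => 'X' :: c)
            (pvKeepL M N nb k)
          = List.replicate (M - (pvKeepL M N nb k).length) 'X' ++ pvKeepL M N nb k := by
        generalize (pvKeepL M N nb k) = col
        generalize (M - col.length) = t
        induction t with
        | zero => simp
        | succ s ihs =>
          rw [List.range_succ, List.foldl_append, ihs, List.foldl_cons, List.foldl_nil,
              List.replicate_succ]
          simp
      rw [hrepl, List.set_append, if_neg (by omega), hacc, Nat.sub_self, hdropk,
          List.set_cons_zero]
      simp
    rw [hstep, ih (k+1) (by omega) _ _ (by simp [hacc])]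
    simp only [List.map_cons, List.sum_cons, Prod.mk.injEq, List.append_assoc,
      List.cons_append, List.nil_append]
    exact ⟨by trivial, by ring⟩

-- one round: A's in-place gravity fold produces exactly B's fresh board and count
lemma pvRound_eq (M N : Nat) (nb : List (List Char)) (hlen : nb.length = N) (ans : Int) :
    (List.range N).foldl (pvDropA M (pvMarkA M N nb).2) (nb, ans)
      = ((pvRoundB M N nb).1, ans + (pvRoundB M N nb).2) := by
  have h0 := foldA_aux M N nb hlen N 0 (by omega) [] ans rfl
  rw [List.drop_zero, List.nil_append] at h0
  rw [← List.range_eq_range'] at h0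
  rw [h0, pvRoundB_closed]
  refine Prod.ext ?_ ?_
  · simp only [List.nil_append]
    apply List.map_congr_left
    intro c hc
    have hg := gone_keep M N nb c
    have : M - (pvKeepL M N nb c).length = pvGoneL M N nb c := by omega
    rw [this]
  · simp only
    have hmap : (List.map (fun c => ((M : Int) - ((pvKeepL M N nb c).length : Int))) (List.range N))
        = (List.map (fun c => ((pvGoneL M N nb c : Nat) : Int)) (List.range N)) :=
      List.map_congr_left (fun c _ => by have hg := gone_keep M N nb c; omega)
    rw [hmap]

-- the two loops agree on any shared board with N columns
lemma loop_eq (M N : Nat) : ∀ (fuel : Nat) (nb : List (List Char)) (ans : Int),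
    nb.length = N → pvLoopA M N fuel nb ans = pvLoopB M N fuel nb ans := by
  intro fuel
  induction fuel with
  | zero => intro nb ans _; rfl
  | succ f ih =>
    intro nb ans hlen
    show (if ((pvMarkA M N nb).1 == 0) = true then ans
          else pvLoopA M N f ((List.range N).foldl (pvDropA M (pvMarkA M N nb).2) (nb, ans)).1
            ((List.range N).foldl (pvDropA M (pvMarkA M N nb).2) (nb, ans)).2)
        = (if ((pvRoundB M N nb).2 == 0) = true then ans
          else pvLoopB M N f (pvRoundB M N nb).1 (ans + (pvRoundB M N nb).2))
    rw [cnt_hits_zero M N nb]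
    by_cases h : ((pvRoundB M N nb).2 == 0) = true
    · rw [if_pos h, if_pos h]
    · rw [if_neg h, if_neg h, pvRound_eq M N nb hlen ans]
      apply ih
      rw [pvRoundB_closed]
      simp

-- ===== VERDICT (by name: the statement is the Claim_ definition above) =====
theorem solution_spec : Claim_equal_solution := by
  intro m n board _hdom _hpre
  unfold Spec_solution solution solution_alt
  exact loop_eq m.toNat n.toNat _ _ 0 (by simp)
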